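-- pv_equiv track=rewrite | github.com/Hagdos/Adventofcode | 2023/Day 12/Day 12.py | fillQuestionmarks
-- ===== SOURCE A (Python) =====
-- def fillQuestionmarks(record, numberOfBrokensNeeded):
--     numberOfBrokens = record.count('#')
--     if numberOfBrokens >= numberOfBrokensNeeded:
--         return {record.replace('?', '.')}
--     elif numberOfBrokens + record.count('?') <= numberOfBrokensNeeded:
--         return {record.replace('?', '#')}
--     else:
--         r1 = record.replace('?', '.', 1)
--         r2 = record.replace('?', '#', 1)
--         records = fillQuestionmarks(r1, numberOfBrokensNeeded)
--         records.update(fillQuestionmarks(r2, numberOfBrokensNeeded))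
--
--         return records
-- ===== SOURCE B (Python) =====
-- def _combs(xs, d):
--     # all d-element sublists of xs, in lexicographic (combinations) order
--     if d == 0:
--         return [[]]
--     if not xs:
--         return []
--     first, rest = xs[0], xs[1:]
--     return [[first] + c for c in _combs(rest, d - 1)] + _combs(rest, d)
--
--
-- def fillQuestionmarks(record, numberOfBrokensNeeded):
--     need = numberOfBrokensNeeded - record.count('#')
--     quests = [i for i, c in enumerate(record) if c == '?']
--     if need <= 0:
--         return {record.replace('?', '.')}
--     if need >= len(quests):
--         return {record.replace('?', '#')}
--     dots = len(quests) - need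
--     result = set()
--     for combo in _combs(quests, dots):
--         filled = ''.join(('.' if i in combo else '#') if c == '?' else c
--                          for i, c in enumerate(record))
--         result.add(filled)
--     return result
-- ===== Notes on version B (the rewrite author's own statement) =====
-- stated objective: alternative
-- what changed: A's per-character binary recursion (replace first '?' by '.'/'#', recurse, union the sets) is replaced by computing need = k - record.count('#') once and directly enumerating, via hand-rolled combinations over the list of '?' indices, which '?' become '.', building each output string in one pass.
import Mathlib
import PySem

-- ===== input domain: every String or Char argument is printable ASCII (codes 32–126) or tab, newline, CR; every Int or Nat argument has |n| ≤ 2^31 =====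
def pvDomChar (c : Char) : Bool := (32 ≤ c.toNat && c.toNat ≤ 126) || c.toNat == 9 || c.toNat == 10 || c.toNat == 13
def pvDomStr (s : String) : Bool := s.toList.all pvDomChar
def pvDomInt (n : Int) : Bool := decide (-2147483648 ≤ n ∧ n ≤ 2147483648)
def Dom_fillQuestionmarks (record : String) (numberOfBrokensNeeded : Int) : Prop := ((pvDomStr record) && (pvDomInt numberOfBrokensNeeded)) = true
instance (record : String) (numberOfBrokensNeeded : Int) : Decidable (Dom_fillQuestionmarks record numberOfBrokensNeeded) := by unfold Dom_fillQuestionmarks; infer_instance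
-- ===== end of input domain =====

-- B replaces A's per-character binary recursion by a direct enumeration (via hand-rolled
-- combinations) of which '?' become '.'; equal output set in the same construction order.

-- ===== PORT A =====
-- hand port of str.replace(old, new, 1) for single-character old/new: replaces the first
-- occurrence only (exact: CPython replaces the leftmost occurrence and stops after count=1)
def replaceFirst : List Char → Char → Char → List Char
  | [], _, _ => []
  | a :: t, c, d => if a = c then d :: t else a :: replaceFirst t c d

-- bridge used by the termination argument of the port: PySem's substring count on a
-- single-character needle is plain character count
theorem countgo_single (c : Char) : ∀ (l : List Char) (fuel acc : Nat), l.length ≤ fuel →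
    PySem.Chars.count.go [c] fuel l acc = acc + l.count c := by
  intro l
  induction l with
  | nil => intro fuel acc _; rw [PySem.Chars.count.go.eq_def]; cases fuel <;> simp
  | cons a t ih =>
    intro fuel acc h
    cases fuel with
    | zero => simp at h
    | succ fuel =>
      have h' : t.length ≤ fuel := by simpa using h
      rw [PySem.Chars.count.go.eq_def]
      by_cases hc : c = a
      · subst hc
        simp [List.isPrefixOf, ih fuel (acc + 1) h', List.count_cons]
        omega
      · simp [List.isPrefixOf, hc, Ne.symm hc, ih fuel acc h']

theorem count_single (l : List Char) (c : Char) :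
    PySem.Chars.count l [c] = l.count c := by
  unfold PySem.Chars.count
  simp [countgo_single c l l.length 0 le_rfl]

theorem count_replaceFirst_self (c d : Char) (hcd : c ≠ d) :
    ∀ (l : List Char), 0 < l.count c → (replaceFirst l c d).count c = l.count c - 1 := by
  intro l
  induction l with
  | nil => simp
  | cons a t ih =>
    intro h
    by_cases ha : a = c
    · subst ha
      simp [replaceFirst, List.count_cons, Ne.symm hcd]
    · have ha' : (a == c) = false := by simp [ha]
      simp only [List.count_cons, ha', if_neg Bool.false_ne_true, Nat.add_zero] at h
      have := ih h
      simp [replaceFirst, ha, List.count_cons, this, ha']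

def fillQMA (cs : List Char) (k : Int) : List (List Char) :=
  let numberOfBrokens := PySem.Chars.count cs ['#']
  if _h1 : k ≤ (numberOfBrokens : Int) then
    [PySem.Chars.replace cs ['?'] ['.']]
  else if _h2 : (numberOfBrokens : Int) + (PySem.Chars.count cs ['?'] : Int) ≤ k then
    [PySem.Chars.replace cs ['?'] ['#']]
  else
    PySem.Set.update (fillQMA (replaceFirst cs '?' '.') k) (fillQMA (replaceFirst cs '?' '#') k)
termination_by cs.count '?'
decreasing_by
  all_goals
    simp only [count_single] at _h1 _h2 ⊢
    have hq : 0 < cs.count '?' := by omega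
    rw [count_replaceFirst_self '?' _ (by decide) cs hq]
    omega

def fillQuestionmarks (record : String) (numberOfBrokensNeeded : Int) : List String :=
  (fillQMA record.toList numberOfBrokensNeeded).map String.mk

-- ===== PORT B =====
-- [i for i, c in enumerate(record) if c == '?'] as a structural recursion with an index counter
def questFrom : Nat → List Char → List Nat
  | _, [] => []
  | i, a :: t => if a = '?' then i :: questFrom (i + 1) t else questFrom (i + 1) t

-- _combs from Source B: all d-element sublists in lexicographic (combinations) order
def combs : Nat → List Nat → List (List Nat)
  | 0, _ => [[]]
  | _ + 1, [] => []
  | d + 1, x :: xs => (combs d xs).map (x :: ·) ++ combs (d + 1) xs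

-- the ''.join(... for i, c in enumerate(record)) builder, with an index counter
def fillFrom (combo : List Nat) : Nat → List Char → List Char
  | _, [] => []
  | i, a :: t => (if a = '?' then (if combo.contains i then '.' else '#') else a) :: fillFrom combo (i + 1) t

def fillQMB (cs : List Char) (k : Int) : List (List Char) :=
  let need := k - (PySem.Chars.count cs ['#'] : Int)
  let quests := questFrom 0 cs
  if need ≤ 0 then [PySem.Chars.replace cs ['?'] ['.']]
  else if (quests.length : Int) ≤ need then [PySem.Chars.replace cs ['?'] ['#']]
  else
    PySem.Set.ofList ((combs ((quests.length : Int) - need).toNat quests).map (fun combo => fillFrom combo 0 cs))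

def fillQuestionmarks_alt (record : String) (numberOfBrokensNeeded : Int) : List String :=
  (fillQMB record.toList numberOfBrokensNeeded).map String.mk

-- ===== PRECONDITION & SPEC =====
def Spec_fillQuestionmarks (record : String) (numberOfBrokensNeeded : Int) (out : List String) : Prop := out = fillQuestionmarks_alt record numberOfBrokensNeeded
instance (record : String) (numberOfBrokensNeeded : Int) (out : List String) : Decidable (Spec_fillQuestionmarks record numberOfBrokensNeeded out) := by unfold Spec_fillQuestionmarks; infer_instance

-- ===== CLAIM (what is proved, stated in full; the proofs are below) =====
def Claim_equal_fillQuestionmarks : Prop := ∀ (record : String) (numberOfBrokensNeeded : Int), Dom_fillQuestionmarks record numberOfBrokensNeeded → Spec_fillQuestionmarks record numberOfBrokensNeeded (fillQuestionmarks record numberOfBrokensNeeded)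

-- ===== LEMMAS AND PROOFS =====

theorem replacego_single (c d : Char) : ∀ (l : List Char) (fuel : Nat) (acc : List Char), l.length ≤ fuel →
    PySem.Chars.replace.go [c] [d] fuel l acc =
      acc.reverse ++ l.map (fun a => if a = c then d else a) := by
  intro l
  induction l with
  | nil => intro fuel acc _; rw [PySem.Chars.replace.go.eq_def]; cases fuel <;> simp
  | cons a t ih =>
    intro fuel acc h
    cases fuel with
    | zero => simp at h
    | succ fuel =>
      have h' : t.length ≤ fuel := by simpa using h
      rw [PySem.Chars.replace.go.eq_def]
      by_cases hc : c = a
      · subst hc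
        simp [List.isPrefixOf, ih fuel (d :: acc) h']
      · simp [List.isPrefixOf, hc, Ne.symm hc, ih fuel (a :: acc) h']

theorem replace_single (l : List Char) (c d : Char) :
    PySem.Chars.replace l [c] [d] = l.map (fun a => if a = c then d else a) := by
  unfold PySem.Chars.replace
  simp [replacego_single c d l l.length [] le_rfl]

theorem length_questFrom : ∀ (l : List Char) (i : Nat), (questFrom i l).length = l.count '?' := by
  intro l
  induction l with
  | nil => intro i; simp [questFrom]
  | cons a t ih =>
    intro i
    by_cases ha : a = '?'
    · subst ha; simp [questFrom, ih, List.count_cons]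
    · simp [questFrom, ha, Ne.symm ha, ih, List.count_cons]

theorem mem_questFrom_ge : ∀ (l : List Char) (i j : Nat), j ∈ questFrom i l → i ≤ j := by
  intro l
  induction l with
  | nil => intro i j hj; simp [questFrom] at hj
  | cons a t ih =>
    intro i j hj
    by_cases ha : a = '?'
    · subst ha
      simp only [questFrom, if_pos rfl] at hj
      rcases List.mem_cons.mp hj with h1 | h1
      · omega
      · exact Nat.le_of_succ_le (ih (i + 1) j h1)
    · simp only [questFrom, if_neg ha] at hj
      exact Nat.le_of_succ_le (ih (i + 1) j hj)

theorem pairwise_questFrom : ∀ (l : List Char) (i : Nat), (questFrom i l).Pairwise (· < ·) := by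
  intro l
  induction l with
  | nil => intro i; simp [questFrom]
  | cons a t ih =>
    intro i
    by_cases ha : a = '?'
    · subst ha
      simp only [questFrom, if_pos rfl]
      exact List.Pairwise.cons (fun j hj => Nat.lt_of_succ_le (mem_questFrom_ge t (i + 1) j hj)) (ih (i + 1))
    · simp only [questFrom, if_neg ha]
      exact ih (i + 1)

theorem count_replaceFirst_other (a c d : Char) (hac : a ≠ c) (had : a ≠ d) :
    ∀ (l : List Char), (replaceFirst l c d).count a = l.count a := by
  intro l
  induction l with
  | nil => simp [replaceFirst]
  | cons x t ih =>
    by_cases hx : x = c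
    · subst hx
      simp [replaceFirst, List.count_cons, Ne.symm hac, Ne.symm had, hac, had]
    · simp [replaceFirst, hx, List.count_cons, ih]

theorem count_replaceFirst_new (c d : Char) (hcd : c ≠ d) :
    ∀ (l : List Char), 0 < l.count c → (replaceFirst l c d).count d = l.count d + 1 := by
  intro l
  induction l with
  | nil => simp
  | cons x t ih =>
    intro h
    by_cases hx : x = c
    · subst hx
      simp [replaceFirst, List.count_cons, Ne.symm hcd, hcd]
    · have hx' : (x == c) = false := by simp [hx]
      simp only [List.count_cons, hx', if_neg Bool.false_ne_true, Nat.add_zero] at h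
      simp [replaceFirst, hx, List.count_cons, ih h]
      omega

theorem questFrom_replaceFirst (d : Char) (hd : d ≠ '?') :
    ∀ (l : List Char) (i : Nat), questFrom i (replaceFirst l '?' d) = (questFrom i l).tail := by
  intro l
  induction l with
  | nil => intro i; simp [replaceFirst, questFrom]
  | cons a t ih =>
    intro i
    by_cases ha : a = '?'
    · subst ha
      simp [replaceFirst, questFrom, hd]
    · simp [replaceFirst, ha, questFrom, ih]

theorem fillFrom_cons_lt : ∀ (l : List Char) (i p : Nat) (combo : List Nat), p < i →
    fillFrom (p :: combo) i l = fillFrom combo i l := by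
  intro l
  induction l with
  | nil => intro i p combo _; simp [fillFrom]
  | cons a t ih =>
    intro i p combo hp
    simp only [fillFrom]
    rw [ih (i + 1) p combo (Nat.lt_succ_of_lt hp)]
    congr 1
    by_cases ha : a = '?'
    · subst ha
      have hip : ¬ i = p := fun h => Nat.ne_of_lt hp h.symm
      simp [hip]
    · simp [ha]

theorem fillFrom_replaceFirst_dot : ∀ (l : List Char) (i : Nat) (p : Nat) (rest : List Nat) (combo : List Nat),
    questFrom i l = p :: rest →
    fillFrom combo i (replaceFirst l '?' '.') = fillFrom (p :: combo) i l := by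
  intro l
  induction l with
  | nil => intro i p rest combo h; simp [questFrom] at h
  | cons a t ih =>
    intro i p rest combo h
    by_cases ha : a = '?'
    · subst ha
      simp only [questFrom, if_pos rfl, List.cons.injEq] at h
      obtain ⟨rfl, _⟩ := h
      simp only [replaceFirst, if_pos rfl, fillFrom]
      rw [fillFrom_cons_lt t (i + 1) i combo (Nat.lt_succ_self i)]
      simp [fillFrom]
    · simp only [questFrom, if_neg ha] at h
      simp only [replaceFirst, if_neg ha, fillFrom, ha, if_false, reduceIte]
      rw [ih (i + 1) p rest combo h]

theorem fillFrom_replaceFirst_hash : ∀ (l : List Char) (i : Nat) (p : Nat) (rest : List Nat) (combo : List Nat),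
    questFrom i l = p :: rest → (∀ j ∈ combo, p < j) →
    fillFrom combo i (replaceFirst l '?' '#') = fillFrom combo i l := by
  intro l
  induction l with
  | nil => intro i p rest combo h _; simp [questFrom] at h
  | cons a t ih =>
    intro i p rest combo h hcombo
    by_cases ha : a = '?'
    · subst ha
      simp only [questFrom, if_pos rfl, List.cons.injEq] at h
      obtain ⟨rfl, _⟩ := h
      simp only [replaceFirst, if_pos rfl, fillFrom]
      have hnm : ¬ i ∈ combo := fun hm => lt_irrefl i (hcombo i hm)
      simp [List.contains_eq_mem, hnm, fillFrom]
    · simp only [questFrom, if_neg ha] at h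
      simp only [replaceFirst, if_neg ha, fillFrom, ha, if_false, reduceIte]
      rw [ih (i + 1) p rest combo h hcombo]

theorem combs_of_gt : ∀ (xs : List Nat) (d : Nat), xs.length < d → combs d xs = [] := by
  intro xs
  induction xs with
  | nil => intro d hd; cases d with | zero => simp at hd | succ d => simp [combs]
  | cons x t ih =>
    intro d hd
    cases d with
    | zero => simp at hd
    | succ d =>
      simp only [List.length_cons, Nat.succ_lt_succ_iff] at hd
      simp [combs, ih d hd, ih (d + 1) (Nat.lt_succ_of_lt hd)]

theorem combs_full : ∀ (xs : List Nat), combs xs.length xs = [xs] := by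
  intro xs
  induction xs with
  | nil => simp [combs]
  | cons x t ih =>
    simp only [List.length_cons, combs]
    rw [ih, combs_of_gt t (t.length + 1) (Nat.lt_succ_self _)]
    simp

theorem combs_sublist : ∀ (d : Nat) (xs : List Nat) (c : List Nat), c ∈ combs d xs → c.Sublist xs := by
  intro d
  induction d using Nat.strong_induction_on with
  | _ d ihd =>
  intro xs
  induction xs generalizing d with
  | nil =>
    intro c hc
    cases d with
    | zero => simp [combs] at hc; simp [hc]
    | succ d => simp [combs] at hc
  | cons x t ih =>
    intro c hc
    cases d with
    | zero =>
      simp [combs] at hc; simp [hc]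
    | succ d =>
      simp only [combs, List.mem_append, List.mem_map] at hc
      rcases hc with ⟨c', hc', rfl⟩ | hc
      · exact List.Sublist.cons₂ x (ihd d (Nat.lt_succ_self d) t c' hc')
      · exact List.Sublist.cons x (ih (d + 1) (fun m hm => ihd m hm) c hc)

theorem mem_of_mem_combs : ∀ (d : Nat) (xs : List Nat) (c : List Nat) (j : Nat),
    c ∈ combs d xs → j ∈ c → j ∈ xs := by
  intro d xs c j hc hj
  exact (combs_sublist d xs c hc).subset hj

theorem nodup_combs : ∀ (d : Nat) (xs : List Nat), xs.Nodup → (combs d xs).Nodup := by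
  intro d
  induction d using Nat.strong_induction_on with
  | _ d ihd =>
  intro xs
  induction xs generalizing d with
  | nil =>
    intro _
    cases d with
    | zero => simp [combs]
    | succ d => simp [combs]
  | cons x t ih =>
    intro hnd
    have hx : x ∉ t := (List.nodup_cons.mp hnd).1
    have hnt : t.Nodup := (List.nodup_cons.mp hnd).2
    cases d with
    | zero => simp [combs]
    | succ d =>
      simp only [combs]
      apply List.Nodup.append
      · exact ((ihd d (Nat.lt_succ_self d) t hnt).map (fun a b h => by simpa using h))
      · exact ih (d + 1) (fun m hm => ihd m hm) hnt
      · intro c hc1 hc2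
        simp only [List.mem_map] at hc1
        obtain ⟨c', _, rfl⟩ := hc1
        have : x ∈ t := mem_of_mem_combs (d + 1) t (x :: c') x hc2 (List.mem_cons_self ..)
        exact hx this

theorem fillFrom_subset_dots : ∀ (l : List Char) (i : Nat) (combo : List Nat),
    (∀ j ∈ questFrom i l, j ∈ combo) →
    fillFrom combo i l = l.map (fun a => if a = '?' then '.' else a) := by
  intro l
  induction l with
  | nil => intro i combo _; simp [fillFrom]
  | cons a t ih =>
    intro i combo hsub
    by_cases ha : a = '?'
    · subst ha
      have hi : i ∈ combo := hsub i (by simp [questFrom])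
      have ht : ∀ j ∈ questFrom (i + 1) t, j ∈ combo := fun j hj =>
        hsub j (by simp [questFrom, hj])
      simp [fillFrom, List.contains_eq_mem, hi, ih (i + 1) combo ht]
    · have ht : ∀ j ∈ questFrom (i + 1) t, j ∈ combo := fun j hj =>
        hsub j (by simpa [questFrom, ha] using hj)
      simp [fillFrom, ha, ih (i + 1) combo ht]

theorem fillFrom_nil_hash : ∀ (l : List Char) (i : Nat),
    fillFrom [] i l = l.map (fun a => if a = '?' then '#' else a) := by
  intro l
  induction l with
  | nil => intro i; simp [fillFrom]
  | cons a t ih =>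
    intro i
    by_cases ha : a = '?'
    · subst ha; simp [fillFrom, ih]
    · simp [fillFrom, ha, ih]

theorem fillFrom_mem_iff : ∀ (l : List Char) (i : Nat) (c1 c2 : List Nat),
    fillFrom c1 i l = fillFrom c2 i l → ∀ j ∈ questFrom i l, (j ∈ c1 ↔ j ∈ c2) := by
  intro l
  induction l with
  | nil => intro i c1 c2 _ j hj; simp [questFrom] at hj
  | cons a t ih =>
    intro i c1 c2 heq j hj
    by_cases ha : a = '?'
    · subst ha
      simp only [fillFrom, if_pos rfl, List.cons.injEq] at heq
      obtain ⟨hhead, htail⟩ := heq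
      simp only [questFrom, if_pos rfl] at hj
      rcases List.mem_cons.mp hj with rfl | hj'
      · by_cases h1 : j ∈ c1
        · have h2 : j ∈ c2 := by
            by_contra h2
            simp [List.contains_eq_mem, h1, h2] at hhead
          simp [h1, h2]
        · have h2 : j ∉ c2 := by
            intro h2
            simp [List.contains_eq_mem, h1, h2] at hhead
          simp [h1, h2]
      · exact ih (i + 1) c1 c2 htail j hj'
    · simp only [fillFrom, if_neg ha, List.cons.injEq] at heq
      simp only [questFrom, if_neg ha] at hj
      exact ih (i + 1) c1 c2 heq.2 j hj

theorem sublist_ext {l c1 c2 : List Nat} (hl : l.Pairwise (· < ·))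
    (h1 : c1.Sublist l) (h2 : c2.Sublist l) (h : ∀ a, a ∈ c1 ↔ a ∈ c2) : c1 = c2 := by
  have hnd : l.Nodup := hl.nodup
  have hs1 : c1.Sorted (· < ·) := hl.sublist h1
  have hs2 : c2.Sorted (· < ·) := hl.sublist h2
  have hperm : c1.Perm c2 :=
    (List.perm_ext_iff_of_nodup (h1.nodup hnd) (h2.nodup hnd)).mpr h
  exact hperm.eq_of_sorted (fun a b _ _ h1 h2 => absurd h2 (lt_asymm h1)) hs1 hs2

theorem fillFrom_inj (cs : List Char) (d : Nat) :
    ∀ c1 ∈ combs d (questFrom 0 cs), ∀ c2 ∈ combs d (questFrom 0 cs),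
      fillFrom c1 0 cs = fillFrom c2 0 cs → c1 = c2 := by
  intro c1 hc1 c2 hc2 heq
  have hmem := fillFrom_mem_iff cs 0 c1 c2 heq
  have hs1 := combs_sublist d _ c1 hc1
  have hs2 := combs_sublist d _ c2 hc2
  refine sublist_ext (pairwise_questFrom cs 0) hs1 hs2 (fun a => ?_)
  constructor
  · intro ha; exact (hmem a (hs1.subset ha)).mp ha
  · intro ha; exact (hmem a (hs2.subset ha)).mpr ha

theorem nodup_combsFill (cs : List Char) (d : Nat) :
    (((combs d (questFrom 0 cs)).map (fun combo => fillFrom combo 0 cs))).Nodup := by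
  exact List.Nodup.map_on (fillFrom_inj cs d)
    (nodup_combs d _ (pairwise_questFrom cs 0).nodup)

theorem foldl_add_nodup {α : Type} [BEq α] [LawfulBEq α] :
    ∀ (xs acc : List α), (acc ++ xs).Nodup → xs.foldl PySem.Set.add acc = acc ++ xs := by
  intro xs
  induction xs with
  | nil => intro acc _; simp
  | cons x t ih =>
    intro acc hnd
    have hx : x ∉ acc := by
      intro hm
      have := List.disjoint_of_nodup_append hnd
      exact this hm (by simp)
    have : PySem.Set.add acc x = acc ++ [x] := by
      simp [PySem.Set.add, List.contains_eq_mem, hx]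
    simp only [List.foldl_cons, this]
    rw [ih (acc ++ [x]) (by simpa using hnd)]
    simp

theorem fqB_combs (cs : List Char) (k : Int)
    (h1 : 0 ≤ k - (cs.count '#' : Int)) (h2 : k - (cs.count '#' : Int) ≤ (cs.count '?' : Int)) :
    fillQMB cs k = ((combs (cs.count '?' - (k - (cs.count '#' : Int)).toNat) (questFrom 0 cs)).map
      (fun combo => fillFrom combo 0 cs)) := by
  unfold fillQMB
  simp only [count_single, length_questFrom]
  split_ifs with hle hq
  · -- need ≤ 0, so need = 0 and all '?' become '.'
    have hneed : k - (cs.count '#' : Int) = 0 := le_antisymm hle h1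
    have : cs.count '?' - (k - (cs.count '#' : Int)).toNat = cs.count '?' := by omega
    rw [this, ← length_questFrom cs 0, combs_full]
    simp only [List.map_cons, List.map_nil]
    rw [fillFrom_subset_dots cs 0 (questFrom 0 cs) (fun j hj => hj), ← replace_single]
  · -- q ≤ need, so need = q and all '?' become '#'
    have : cs.count '?' - (k - (cs.count '#' : Int)).toNat = 0 := by omega
    rw [this]
    simp only [combs, List.map_cons, List.map_nil]
    rw [fillFrom_nil_hash, ← replace_single]
  · -- 0 < need < q : the combinations enumeration, deduplication is a no-op
    have harith : ((cs.count '?' : Int) - (k - (cs.count '#' : Int))).toNat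
        = cs.count '?' - (k - (cs.count '#' : Int)).toNat := by omega
    rw [harith, PySem.Set.ofList_eq_foldl,
      foldl_add_nodup _ [] (by simpa using nodup_combsFill cs _)]
    simp

theorem fqA_eq_fqB : ∀ (cs : List Char) (k : Int), fillQMA cs k = fillQMB cs k := by
  intro cs k
  suffices H : ∀ (n : Nat) (cs : List Char), cs.count '?' = n → fillQMA cs k = fillQMB cs k by
    exact H _ cs rfl
  intro n
  induction n using Nat.strong_induction_on with
  | _ n ihn =>
  intro cs hn
  by_cases hA1 : k ≤ (cs.count '#' : Int)
  · rw [fillQMA.eq_def]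
    unfold fillQMB
    simp only [count_single, length_questFrom]
    rw [dif_pos hA1, if_pos (by omega)]
  · by_cases hA2 : (cs.count '#' : Int) + (cs.count '?' : Int) ≤ k
    · rw [fillQMA.eq_def]
      unfold fillQMB
      simp only [count_single, length_questFrom]
      rw [dif_neg hA1, dif_pos hA2, if_neg (by omega), if_pos (by omega)]
    · -- recursive case
      have hq : 0 < cs.count '?' := by omega
      obtain ⟨p, rest, hqs⟩ : ∃ p rest, questFrom 0 cs = p :: rest := by
        cases hq' : questFrom 0 cs with
        | nil => exfalso; have := length_questFrom cs 0; rw [hq'] at this; simp at this; omega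
        | cons p rest => exact ⟨p, rest, rfl⟩
      have hrest : ∀ j ∈ rest, p < j := by
        have := pairwise_questFrom cs 0
        rw [hqs] at this
        exact (List.pairwise_cons.mp this).1
      -- counts of the two reduced strings
      have hc1h : (replaceFirst cs '?' '.').count '#' = cs.count '#' :=
        count_replaceFirst_other '#' '?' '.' (by decide) (by decide) cs
      have hc1q : (replaceFirst cs '?' '.').count '?' = cs.count '?' - 1 :=
        count_replaceFirst_self '?' '.' (by decide) cs hq
      have hc2h : (replaceFirst cs '?' '#').count '#' = cs.count '#' + 1 :=
        count_replaceFirst_new '?' '#' (by decide) cs hq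
      have hc2q : (replaceFirst cs '?' '#').count '?' = cs.count '?' - 1 :=
        count_replaceFirst_self '?' '#' (by decide) cs hq
      have hq1 : questFrom 0 (replaceFirst cs '?' '.') = rest := by
        rw [questFrom_replaceFirst '.' (by decide), hqs]; rfl
      have hq2 : questFrom 0 (replaceFirst cs '?' '#') = rest := by
        rw [questFrom_replaceFirst '#' (by decide), hqs]; rfl
      -- one step of A
      rw [fillQMA.eq_def]
      simp only [count_single]
      rw [dif_neg hA1, dif_neg hA2]
      -- IH on both branches
      rw [ihn ((replaceFirst cs '?' '.').count '?') (by omega) _ rfl,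
          ihn ((replaceFirst cs '?' '#').count '?') (by omega) _ rfl]
      -- express both branches through the combinations formula
      rw [fqB_combs (replaceFirst cs '?' '.') k (by rw [hc1h]; omega)
            (by rw [hc1h, hc1q]; omega),
          fqB_combs (replaceFirst cs '?' '#') k (by rw [hc2h]; omega)
            (by rw [hc2h, hc2q]; omega),
          fqB_combs cs k (by omega) (by omega)]
      rw [hq1, hq2, hc1h, hc1q, hc2h, hc2q, hqs]
      -- rewrite the two branch maps as maps over cs itself
      rw [List.map_congr_left (fun c _ => fillFrom_replaceFirst_dot cs 0 p rest c hqs)]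
      rw [List.map_congr_left (fun c hc => fillFrom_replaceFirst_hash cs 0 p rest c hqs
            (fun j hj => hrest j ((combs_sublist _ rest c hc).subset hj)))]
      -- arithmetic on the choice sizes, then split the combinations over p :: rest
      push_cast
      have e2 : cs.count '?' - 1 - (k - ((cs.count '#' : Int) + 1)).toNat
          = cs.count '?' - 1 - (k - (cs.count '#' : Int)).toNat + 1 := by omega
      have hD : cs.count '?' - (k - (cs.count '#' : Int)).toNat
          = cs.count '?' - 1 - (k - (cs.count '#' : Int)).toNat + 1 := by omega
      rw [e2, hD, combs, List.map_append]
      have hcomp : (fun c => fillFrom (p :: c) 0 cs)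
          = (fun combo => fillFrom combo 0 cs) ∘ (p :: ·) := rfl
      rw [hcomp, ← List.map_map]
      have hnodup := nodup_combsFill cs (cs.count '?' - 1 - (k - (cs.count '#' : Int)).toNat + 1)
      rw [hqs, combs, List.map_append] at hnodup
      unfold PySem.Set.update
      rw [foldl_add_nodup _ _ hnodup]

-- ===== VERDICT (by name: the statement is the Claim_ definition above) =====
theorem fillQuestionmarks_spec : Claim_equal_fillQuestionmarks := by
  intro record k _
  unfold Spec_fillQuestionmarks fillQuestionmarks fillQuestionmarks_alt
  rw [fqA_eq_fqB]
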